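-- pv_equiv track=rewrite | github.com/ashudnsingh/CodeSignal | The Core/Labyrinth of Nested Loops/050 - crosswordFormation.py | crosswordFormation
-- ===== SOURCE A (Python) =====
-- import itertools, collections
--
-- def crosswordFormation(words):
--     ans = 0
--     for p in itertools.permutations(words):
--         M = collections.defaultdict(int)
--         a,b,c,d = p
--         for i in range(2, min(a.__len__(),b.__len__())):
--             for p in range(a.__len__() - i):
--                 for q in range(b.__len__() - i):
--                     M[a[p],a[p+i],b[q],b[q+i]] += 1
--         for i in range(2, min(c.__len__(),d.__len__())):
--             for p in range(c.__len__() - i):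
--                 for q in range(d.__len__() - i):
--                     ans += M[c[p],d[q],c[p+i],d[q+i]]
--     return ans
-- ===== SOURCE B (Python) =====
-- import itertools
--
-- def crosswordFormation(words):
--     # Direct brute force: no index table, just scan all grid placements.
--     ans = 0
--     for a, b, c, d in itertools.permutations(words):
--         for i2 in range(2, min(len(c), len(d))):
--             for p2 in range(len(c) - i2):
--                 for q2 in range(len(d) - i2):
--                     for i1 in range(2, min(len(a), len(b))):
--                         for p1 in range(len(a) - i1):
--                             for q1 in range(len(b) - i1):
--                                 if (a[p1] == c[p2] and a[p1 + i1] == d[q2]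
--                                         and b[q1] == c[p2 + i2] and b[q1 + i1] == d[q2 + i2]):
--                                     ans += 1
--     return ans
-- ===== Notes on version B (the rewrite author's own statement) =====
-- stated objective: simpler
-- what changed: Drops the defaultdict index table entirely: B counts crossword formations by a direct brute-force scan, nesting the (gap,row,col) loops of the c/d side over those of the a/b side and testing the four character equalities in place, so the two gaps stay independent and no intermediate table is built.
import Mathlib
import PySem

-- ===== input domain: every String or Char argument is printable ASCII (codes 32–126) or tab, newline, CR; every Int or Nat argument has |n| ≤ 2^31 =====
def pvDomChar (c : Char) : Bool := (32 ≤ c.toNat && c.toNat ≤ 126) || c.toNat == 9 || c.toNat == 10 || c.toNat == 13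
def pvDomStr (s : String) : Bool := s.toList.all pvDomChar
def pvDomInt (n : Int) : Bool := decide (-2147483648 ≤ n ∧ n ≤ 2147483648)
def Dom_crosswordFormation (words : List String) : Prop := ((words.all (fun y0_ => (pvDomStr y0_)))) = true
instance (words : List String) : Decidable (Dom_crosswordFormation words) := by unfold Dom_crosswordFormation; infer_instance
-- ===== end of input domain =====

-- B drops A's defaultdict index table and counts the same crossword formations by a direct
-- brute-force scan over all placements (same value; B is simpler but not faster).


-- ===== PORT A =====
-- Literal port of A. Loop indices are Nats that stay in range, so string indexing s[k]
-- is ported exactly as s.toList.getD k ' ' (the default is never read).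
def crosswordFormation (words : List String) : Int :=
  (PySem.List.permutations words words.length).foldl (fun ans perm =>
    match perm with
    | [a, b, c, d] =>
      let la := a.toList; let lb := b.toList; let lc := c.toList; let ld := d.toList
      let M : PySem.Dict (Char × Char × Char × Char) Int :=
        (List.range' 2 (min la.length lb.length - 2)).foldl (fun M i =>
          (List.range (la.length - i)).foldl (fun M p =>
            (List.range (lb.length - i)).foldl (fun M q =>
              M.modify (la.getD p ' ', la.getD (p + i) ' ', lb.getD q ' ', lb.getD (q + i) ' ')
                0 (· + 1)) M) M) PySem.Dict.empty
      (List.range' 2 (min lc.length ld.length - 2)).foldl (fun ans i =>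
        (List.range (lc.length - i)).foldl (fun ans p =>
          (List.range (ld.length - i)).foldl (fun ans q =>
            ans + M.getD (lc.getD p ' ', ld.getD q ' ', lc.getD (p + i) ' ', ld.getD (q + i) ' ')
              0) ans) ans) ans
    | _ => ans) 0    -- unreachable under Pre_ (Python unpacking raises unless the tuple has 4 parts)

-- ===== PORT B =====
def crosswordFormation_alt (words : List String) : Int :=
  (PySem.List.permutations words words.length).foldl (fun ans perm =>
    if perm.length == 4 then
      let a := perm.getD 0 ""; let b := perm.getD 1 ""
      let c := perm.getD 2 ""; let d := perm.getD 3 ""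
      let la := a.toList; let lb := b.toList; let lc := c.toList; let ld := d.toList
      (List.range' 2 (min lc.length ld.length - 2)).foldl (fun ans i2 =>
        (List.range (lc.length - i2)).foldl (fun ans p2 =>
          (List.range (ld.length - i2)).foldl (fun ans q2 =>
            (List.range' 2 (min la.length lb.length - 2)).foldl (fun ans i1 =>
              (List.range (la.length - i1)).foldl (fun ans p1 =>
                (List.range (lb.length - i1)).foldl (fun ans q1 =>
                  if la.getD p1 ' ' == lc.getD p2 ' ' && la.getD (p1 + i1) ' ' == ld.getD q2 ' '
                      && lb.getD q1 ' ' == lc.getD (p2 + i2) ' '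
                      && lb.getD (q1 + i1) ' ' == ld.getD (q2 + i2) ' '
                  then ans + 1 else ans) ans) ans) ans) ans) ans) ans
    else ans) 0    -- unreachable under Pre_ (B's Python raises here too)

-- ===== PRECONDITION & SPEC =====
-- Pre_ excludes exactly the inputs where A raises: unless len(words) == 4, the tuple
-- unpacking 'a,b,c,d = p' raises ValueError (B raises there too).
def Pre_crosswordFormation (words : List String) : Prop := words.length = 4
instance (words : List String) : Decidable (Pre_crosswordFormation words) := by
  unfold Pre_crosswordFormation; infer_instance
def pvWitness_crosswordFormation : List String := ["baa", "aba", "baa", "aab"]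
def Spec_crosswordFormation (words : List String) (out : Int) : Prop := out = crosswordFormation_alt words
instance (words : List String) (out : Int) : Decidable (Spec_crosswordFormation words out) := by unfold Spec_crosswordFormation; infer_instance

-- ===== CLAIM (what is proved, stated in full; the proofs are below) =====
def Claim_equal_crosswordFormation : Prop := ∀ (words : List String), Dom_crosswordFormation words → Pre_crosswordFormation words → Spec_crosswordFormation words (crosswordFormation words)

-- ===== LEMMAS AND PROOFS =====

-- the (gap, pos-in-x, pos-in-y) triples both programs enumerate, flattened
def pvTri (lx ly : List Char) : List (Nat × Nat × Nat) :=
  (List.range' 2 (min lx.length ly.length - 2)).flatMap fun i =>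
    (List.range (lx.length - i)).flatMap fun p =>
      (List.range (ly.length - i)).map fun q => (i, p, q)

def pvKey1 (la lb : List Char) (t : Nat × Nat × Nat) : Char × Char × Char × Char :=
  (la.getD t.2.1 ' ', la.getD (t.2.1 + t.1) ' ', lb.getD t.2.2 ' ', lb.getD (t.2.2 + t.1) ' ')

def pvKey2 (lc ld : List Char) (t : Nat × Nat × Nat) : Char × Char × Char × Char :=
  (lc.getD t.2.1 ' ', ld.getD t.2.2 ' ', lc.getD (t.2.1 + t.1) ' ', ld.getD (t.2.2 + t.1) ' ')

-- a nested (range', range, range) fold is the fold over the flattened triple list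
theorem pv_foldl_tri {γ : Type} (lx ly : List Char) (g : γ → Nat × Nat × Nat → γ) (init : γ) :
    (pvTri lx ly).foldl g init =
      (List.range' 2 (min lx.length ly.length - 2)).foldl (fun z i =>
        (List.range (lx.length - i)).foldl (fun z p =>
          (List.range (ly.length - i)).foldl (fun z q => g z (i, p, q)) z) z) init := by
  unfold pvTri
  rw [List.foldl_flatMap]
  refine PySem.List.foldl_congr_mem _ _ _ _ (fun z i _ => ?_)
  rw [List.foldl_flatMap]
  refine PySem.List.foldl_congr_mem _ _ _ _ (fun z' p _ => ?_)
  rw [List.foldl_map]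

-- BEq on a 4-tuple of Chars is the conjunction of the component tests
theorem pv_beq4 (x1 x2 x3 x4 y1 y2 y3 y4 : Char) :
    (((x1, x2, x3, x4) : Char × Char × Char × Char) == (y1, y2, y3, y4))
      = (x1 == y1 && x2 == y2 && x3 == y3 && x4 == y4) := by
  rw [Bool.eq_iff_iff]; simp [Prod.ext_iff]; tauto

-- per-permutation: A's dict pass equals B's direct scan
theorem pv_perm_step (a b c d : String) (ans : Int) :
    (let la := a.toList; let lb := b.toList; let lc := c.toList; let ld := d.toList
     let M : PySem.Dict (Char × Char × Char × Char) Int :=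
       (List.range' 2 (min la.length lb.length - 2)).foldl (fun M i =>
         (List.range (la.length - i)).foldl (fun M p =>
           (List.range (lb.length - i)).foldl (fun M q =>
             M.modify (la.getD p ' ', la.getD (p + i) ' ', lb.getD q ' ', lb.getD (q + i) ' ')
               0 (· + 1)) M) M) PySem.Dict.empty
     (List.range' 2 (min lc.length ld.length - 2)).foldl (fun ans i =>
       (List.range (lc.length - i)).foldl (fun ans p =>
         (List.range (ld.length - i)).foldl (fun ans q =>
           ans + M.getD (lc.getD p ' ', ld.getD q ' ', lc.getD (p + i) ' ', ld.getD (q + i) ' ')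
             0) ans) ans) ans)
    =
    (let la := a.toList; let lb := b.toList; let lc := c.toList; let ld := d.toList
     (List.range' 2 (min lc.length ld.length - 2)).foldl (fun ans i2 =>
       (List.range (lc.length - i2)).foldl (fun ans p2 =>
         (List.range (ld.length - i2)).foldl (fun ans q2 =>
           (List.range' 2 (min la.length lb.length - 2)).foldl (fun ans i1 =>
             (List.range (la.length - i1)).foldl (fun ans p1 =>
               (List.range (lb.length - i1)).foldl (fun ans q1 =>
                 if la.getD p1 ' ' == lc.getD p2 ' ' && la.getD (p1 + i1) ' ' == ld.getD q2 ' '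
                     && lb.getD q1 ' ' == lc.getD (p2 + i2) ' '
                     && lb.getD (q1 + i1) ' ' == ld.getD (q2 + i2) ' '
                 then ans + 1 else ans) ans) ans) ans) ans) ans) ans) := by
  simp only
  set la := a.toList; set lb := b.toList; set lc := c.toList; set ld := d.toList
  -- A's dict is the counter of the flattened key-1 list
  have hM :
      (List.range' 2 (min la.length lb.length - 2)).foldl (fun M i =>
        (List.range (la.length - i)).foldl (fun M p =>
          (List.range (lb.length - i)).foldl (fun M q =>
            PySem.Dict.modify M
              (la.getD p ' ', la.getD (p + i) ' ', lb.getD q ' ', lb.getD (q + i) ' ')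
              0 (· + 1)) M) M) PySem.Dict.empty
      = PySem.Dict.counter ((pvTri la lb).map (pvKey1 la lb)) := by
    rw [PySem.Dict.counter_eq_foldl, List.foldl_map]
    exact (pv_foldl_tri la lb
      (fun d t => PySem.Dict.modify d (pvKey1 la lb t) 0 (· + 1)) PySem.Dict.empty).symm
  rw [hM]
  refine Eq.trans (Eq.trans
    (pv_foldl_tri lc ld (fun z t =>
      z + (PySem.Dict.counter ((pvTri la lb).map (pvKey1 la lb))).getD (pvKey2 lc ld t) 0)
      ans).symm ?_)
    (pv_foldl_tri lc ld (fun z t2 =>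
      (List.range' 2 (min la.length lb.length - 2)).foldl (fun z i1 =>
        (List.range (la.length - i1)).foldl (fun z p1 =>
          (List.range (lb.length - i1)).foldl (fun z q1 =>
            if la.getD p1 ' ' == lc.getD t2.2.1 ' ' && la.getD (p1 + i1) ' ' == ld.getD t2.2.2 ' '
                && lb.getD q1 ' ' == lc.getD (t2.2.1 + t2.1) ' '
                && lb.getD (q1 + i1) ' ' == ld.getD (t2.2.2 + t2.1) ' '
            then z + 1 else z) z) z) z) ans)
  refine PySem.List.foldl_congr_mem _ _ _ _ (fun acc t2 _ => ?_)
  obtain ⟨i2, p2, q2⟩ := t2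
  calc acc + (PySem.Dict.counter ((pvTri la lb).map (pvKey1 la lb))).getD
        (pvKey2 lc ld (i2, p2, q2)) 0
      = acc + (((pvTri la lb).map (pvKey1 la lb)).count (pvKey2 lc ld (i2, p2, q2)) : Int) := by
        rw [PySem.Dict.getD_counter]
    _ = acc + (((pvTri la lb).countP fun t1 =>
          la.getD t1.2.1 ' ' == lc.getD p2 ' ' && la.getD (t1.2.1 + t1.1) ' ' == ld.getD q2 ' '
            && lb.getD t1.2.2 ' ' == lc.getD (p2 + i2) ' '
            && lb.getD (t1.2.2 + t1.1) ' ' == ld.getD (q2 + i2) ' ') : Int) := by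
        rw [List.count_eq_countP, List.countP_map]
        congr 2
        refine List.countP_congr (fun t1 _ => ?_)
        obtain ⟨i1, p1, q1⟩ := t1
        rw [Function.comp_apply]
        simp only [pvKey1, pvKey2]
        rw [pv_beq4 (la.getD p1 ' ') (la.getD (p1 + i1) ' ') (lb.getD q1 ' ')
          (lb.getD (q1 + i1) ' ') (lc.getD p2 ' ') (ld.getD q2 ' ') (lc.getD (p2 + i2) ' ')
          (ld.getD (q2 + i2) ' ')]
    _ = (pvTri la lb).foldl (fun z t1 =>
          if la.getD t1.2.1 ' ' == lc.getD p2 ' ' && la.getD (t1.2.1 + t1.1) ' ' == ld.getD q2 ' '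
              && lb.getD t1.2.2 ' ' == lc.getD (p2 + i2) ' '
              && lb.getD (t1.2.2 + t1.1) ' ' == ld.getD (q2 + i2) ' '
          then z + 1 else z) acc := (PySem.List.foldl_if_add_one _ _ acc).symm
    _ = _ := pv_foldl_tri la lb _ acc

-- ===== VERDICT (by name: the statement is the Claim_ definition above) =====
theorem crosswordFormation_spec : Claim_equal_crosswordFormation := by
  intro words _ _
  unfold Spec_crosswordFormation crosswordFormation crosswordFormation_alt
  refine PySem.List.foldl_congr_mem _ _ _ _ (fun acc perm _ => ?_)
  match perm with
  | [] => rfl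
  | [_] => rfl
  | [_, _] => rfl
  | [_, _, _] => rfl
  | [a, b, c, d] => exact pv_perm_step a b c d acc
  | e1 :: e2 :: e3 :: e4 :: e5 :: rest => ?_
  have hlen : ((e1 :: e2 :: e3 :: e4 :: e5 :: rest).length == 4) = false := by
    simp [List.length]
  simp only [hlen, Bool.false_eq_true, if_false]
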